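-- pv_equiv track=rewrite | github.com/intuitive-robots/NILS | nils/specialist_models/clip_utils.py | split_label
-- ===== SOURCE A (Python) =====
-- def split_label(x: str):
--     x = x.replace('_or_', ',')
--     x = x.replace('/', ',')
--     x = x.replace('_', ' ')
--     x = x.lower()
--     x = x.split(',')
--     x = [_x.strip() for _x in x]
--     return x
-- ===== SOURCE B (Python) =====
-- def split_label(x: str):
--     # One left-to-right scan splitting on '_or_', '/' and ',' directly on the
--     # original string, then per-piece normalization (underscores -> spaces,
--     # lowercase, strip) instead of A's chain of whole-string passes.
--     parts = []
--     cur = []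
--     i = 0
--     n = len(x)
--     while i < n:
--         if x.startswith('_or_', i):
--             parts.append(''.join(cur))
--             cur = []
--             i += 4
--         elif x[i] == '/' or x[i] == ',':
--             parts.append(''.join(cur))
--             cur = []
--             i += 1
--         else:
--             cur.append(x[i])
--             i += 1
--     parts.append(''.join(cur))
--     return [p.replace('_', ' ').lower().strip() for p in parts]
-- ===== Notes on version B (the rewrite author's own statement) =====
-- stated objective: alternative
-- what changed: Replaces A's chain of four whole-string passes (three replaces, a lower) followed by a comma split with a single left-to-right scan that splits directly on '_or_', '/' and ',' in the original string, then normalizes each piece (underscores to spaces, lowercase, strip).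
import Mathlib
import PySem

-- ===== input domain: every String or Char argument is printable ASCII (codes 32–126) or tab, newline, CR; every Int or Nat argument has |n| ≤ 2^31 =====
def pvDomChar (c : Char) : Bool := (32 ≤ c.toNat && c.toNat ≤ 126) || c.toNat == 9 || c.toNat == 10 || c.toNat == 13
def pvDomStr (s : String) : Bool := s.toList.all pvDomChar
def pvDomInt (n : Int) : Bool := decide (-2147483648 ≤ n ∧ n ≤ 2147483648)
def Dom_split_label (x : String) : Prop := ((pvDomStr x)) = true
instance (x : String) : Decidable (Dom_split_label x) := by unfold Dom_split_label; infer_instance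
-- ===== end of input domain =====

-- B replaces A's chain of whole-string passes (three replaces, lower, split) with one
-- left-to-right scan splitting on '_or_'/'/'/',' plus per-piece normalization; same results.

-- ===== PORT A =====
def split_label (x : String) : List String :=
  let x1 := PySem.Str.replace x "_or_" ","
  let x2 := PySem.Str.replace x1 "/" ","
  let x3 := PySem.Str.replace x2 "_" " "
  let x4 := PySem.Str.lower x3
  let parts := PySem.Chars.splitOn x4.toList [',']          -- x.split(',')
  parts.map (fun p => String.ofList (PySem.Chars.strip p))  -- [_x.strip() for _x in x]

-- ===== PORT B =====
-- the scanning while-loop of Source B: split on '_or_' (4 chars), '/' or ','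
def pvRSplit : List Char → List (List Char)
  | [] => [[]]
  | c :: rest =>
    if List.isPrefixOf ['_', 'o', 'r', '_'] (c :: rest) then
      [] :: pvRSplit (rest.drop 3)
    else if c = '/' ∨ c = ',' then
      [] :: pvRSplit rest
    else
      match pvRSplit rest with
      | [] => [[c]]          -- unreachable: pvRSplit always returns a nonempty list
      | p :: ps => (c :: p) :: ps
termination_by cs => cs.length
decreasing_by
  all_goals simp only [List.length_cons, List.length_drop]; omega

def split_label_alt (x : String) : List String :=
  (pvRSplit x.toList).map
    (fun p => String.ofList (PySem.Chars.strip (PySem.Chars.lower (PySem.Chars.replace p ['_'] [' ']))))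

-- ===== PRECONDITION & SPEC =====
def Spec_split_label (x : String) (out : List String) : Prop := out = split_label_alt x
instance (x : String) (out : List String) : Decidable (Spec_split_label x out) := by unfold Spec_split_label; infer_instance

-- ===== CLAIM (what is proved, stated in full; the proofs are below) =====
def Claim_equal_split_label : Prop := ∀ (x : String), Dom_split_label x → Spec_split_label x (split_label x)

-- ===== LEMMAS AND PROOFS =====

-- substitution performed by replace with a single-char pattern
def pvSub (a b : Char) (c : Char) : Char := if c = a then b else c

-- A's first replace, written as a direct recursion (proof-side mirror of x.replace('_or_', ','))
def pvRepOr : List Char → List Char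
  | [] => []
  | c :: rest =>
    if List.isPrefixOf ['_', 'o', 'r', '_'] (c :: rest) then ',' :: pvRepOr (rest.drop 3)
    else c :: pvRepOr rest
termination_by cs => cs.length
decreasing_by
  all_goals simp only [List.length_cons, List.length_drop]; omega

-- joining pieces back with ','
def pvJoin : List (List Char) → List Char
  | [] => []
  | [p] => p
  | p :: q :: ps => p ++ ',' :: pvJoin (q :: ps)

lemma pvRepOr_cons (c : Char) (rest : List Char) :
    pvRepOr (c :: rest) =
      (if List.isPrefixOf ['_', 'o', 'r', '_'] (c :: rest) then ',' :: pvRepOr (rest.drop 3)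
       else c :: pvRepOr rest) := by
  rw [pvRepOr.eq_def]

lemma not_prefix_comma (c : Char) (l : List Char) (h : c ≠ ',') :
    ¬ List.isPrefixOf [','] (c :: l) = true := by
  simp [List.isPrefixOf]
  intro hh
  exact absurd hh.symm h

lemma replace_single (a b : Char) (cs : List Char) :
    PySem.Chars.replace cs [a] [b] = cs.map (pvSub a b) := by
  have go : ∀ (fuel : Nat) (l acc : List Char), l.length ≤ fuel →
      PySem.Chars.replace.go [a] [b] fuel l acc = acc.reverse ++ l.map (pvSub a b) := by
    intro fuel
    induction fuel with
    | zero =>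
      intro l acc h
      have : l = [] := by cases l <;> simp_all
      subst this; rw [PySem.Chars.replace.go]; simp
    | succ f ih =>
      intro l acc h
      cases l with
      | nil => rw [PySem.Chars.replace.go] <;> simp
      | cons c t =>
        rw [PySem.Chars.replace.go]
        by_cases hp : List.isPrefixOf [a] (c :: t)
        · have hc : c = a := by
            simp [List.isPrefixOf] at hp; exact hp.symm
          rw [if_pos hp, ih _ _ (by simpa using Nat.le_of_succ_le_succ h)]
          simp [pvSub, hc]
        · have hc : ¬ c = a := by
            intro hca; apply hp; simp [List.isPrefixOf, hca]
          rw [if_neg hp, ih _ _ (by simpa using Nat.le_of_succ_le_succ h)]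
          simp [pvSub, hc]
  simp only [PySem.Chars.replace, List.isEmpty_cons, Bool.false_eq_true, if_false]
  rw [go cs.length cs [] (le_refl _)]
  simp

lemma replace_or (cs : List Char) :
    PySem.Chars.replace cs ['_', 'o', 'r', '_'] [','] = pvRepOr cs := by
  have go : ∀ (fuel : Nat) (l acc : List Char), l.length ≤ fuel →
      PySem.Chars.replace.go ['_','o','r','_'] [','] fuel l acc = acc.reverse ++ pvRepOr l := by
    intro fuel
    induction fuel with
    | zero =>
      intro l acc h
      have : l = [] := by cases l <;> simp_all
      subst this; rw [PySem.Chars.replace.go]; simp [pvRepOr]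
    | succ f ih =>
      intro l acc h
      cases l with
      | nil => rw [PySem.Chars.replace.go] <;> simp [pvRepOr]
      | cons c t =>
        rw [PySem.Chars.replace.go]
        by_cases hp : List.isPrefixOf ['_','o','r','_'] (c :: t)
        · rw [if_pos hp, ih _ _ (by simp at h ⊢; omega)]
          rw [pvRepOr_cons, if_pos hp]
          simp
        · rw [if_neg hp, ih _ _ (by simpa using Nat.le_of_succ_le_succ h)]
          rw [pvRepOr_cons, if_neg hp]
          simp
  simp only [PySem.Chars.replace, List.isEmpty_cons, Bool.false_eq_true, if_false]
  rw [go cs.length cs [] (le_refl _)]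
  simp

lemma pvRSplit_ne_nil (cs : List Char) : pvRSplit cs ≠ [] := by
  cases cs with
  | nil => simp [pvRSplit]
  | cons c rest =>
    rw [pvRSplit]
    split_ifs <;> try simp
    cases pvRSplit rest <;> simp

lemma comma_slash_free (cs : List Char) : ∀ p ∈ pvRSplit cs, ',' ∉ p ∧ '/' ∉ p := by
  fun_induction pvRSplit with
  | case1 => simp
  | case2 c rest hp ih =>
    intro p hpmem
    rcases List.mem_cons.mp hpmem with h | h
    · simp [h]
    · exact ih p h
  | case3 c rest hp hc ih =>
    intro p hpmem
    rcases List.mem_cons.mp hpmem with h | h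
    · simp [h]
    · exact ih p h
  | case4 c rest hp hc heq ih =>
    exact absurd heq (pvRSplit_ne_nil rest)
  | case5 c rest hp hc p ps heq ih =>
    rw [heq] at ih
    intro q hq
    rcases List.mem_cons.mp hq with h | h
    · subst h
      have := ih p (by simp)
      constructor
      · simp only [List.mem_cons, not_or]
        exact ⟨fun h => hc (Or.inr h.symm), this.1⟩
      · simp only [List.mem_cons, not_or]
        exact ⟨fun h => hc (Or.inl h.symm), this.2⟩
    · exact ih q (List.mem_cons_of_mem _ h)

-- map-subS of A's first replace result = B's pieces joined with ','
lemma repOr_join (cs : List Char) :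
    (pvRepOr cs).map (pvSub '/' ',') = pvJoin (pvRSplit cs) := by
  fun_induction pvRSplit with
  | case1 => simp [pvRepOr, pvJoin]
  | case2 c rest hp ih =>
    rw [pvRepOr_cons, if_pos hp]
    obtain ⟨p, ps, heq⟩ := List.exists_cons_of_ne_nil (pvRSplit_ne_nil (rest.drop 3))
    rw [heq] at ih ⊢
    simp only [List.map_cons, pvJoin, ih, pvSub]
    simp
  | case3 c rest hp hc ih =>
    rw [pvRepOr_cons, if_neg hp]
    obtain ⟨p, ps, heq⟩ := List.exists_cons_of_ne_nil (pvRSplit_ne_nil rest)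
    rw [heq] at ih ⊢
    simp only [List.map_cons, pvJoin, ih]
    rcases hc with h | h <;> simp [pvSub, h]
  | case4 c rest hp hc heq ih =>
    exact absurd heq (pvRSplit_ne_nil rest)
  | case5 c rest hp hc p ps heq ih =>
    rw [pvRepOr_cons, if_neg hp]
    rw [heq] at ih
    have hc2 : pvSub '/' ',' c = c := by
      simp only [pvSub, ite_eq_right_iff]
      exact fun h => absurd (Or.inl h) hc
    cases ps with
    | nil => simp only [List.map_cons, pvJoin] at ih ⊢; simp [hc2, ih]
    | cons q qs => simp only [List.map_cons, pvJoin] at ih ⊢; simp [hc2, ih]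

-- a per-char map that fixes ',' commutes with pvJoin
lemma map_join (f : Char → Char) (hf : f ',' = ',') (ps : List (List Char)) :
    (pvJoin ps).map f = pvJoin (ps.map (List.map f)) := by
  induction ps with
  | nil => simp [pvJoin]
  | cons p ps ih =>
    cases ps with
    | nil => simp [pvJoin]
    | cons q qs => simp only [List.map_cons, pvJoin] at ih ⊢; simp [ih, hf]

-- splitting the ','-join of comma-free pieces recovers the pieces
lemma splitOn_join (ps : List (List Char)) (hne : ps ≠ [])
    (hfree : ∀ p ∈ ps, ',' ∉ p) :
    PySem.Chars.splitOn (pvJoin ps) [','] = ps := by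
  have go : ∀ (ps : List (List Char)) (p cur : List Char) (acc : List (List Char)),
      (∀ q ∈ p :: ps, ',' ∉ q) → ∀ fuel, (pvJoin (p :: ps)).length < fuel →
      PySem.Chars.splitOn.go [','] fuel (pvJoin (p :: ps)) cur acc
        = acc.reverse ++ (cur.reverse ++ p) :: ps := by
    intro ps
    induction ps with
    | nil =>
      intro p
      induction p with
      | nil =>
        intro cur acc hf fuel hfuel
        cases fuel with
        | zero => simp [pvJoin] at hfuel
        | succ f => rw [pvJoin, PySem.Chars.splitOn.go] <;> simp
      | cons c t ihp =>
        intro cur acc hf fuel hfuel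
        cases fuel with
        | zero => simp [pvJoin] at hfuel
        | succ f =>
          have hc : c ≠ ',' := fun h => (hf (c :: t) (by simp)) (by simp [h])
          rw [pvJoin, PySem.Chars.splitOn.go, if_neg (not_prefix_comma c t hc)]
          have hft : ∀ q ∈ [t], ',' ∉ q := fun q hq hm =>
            (hf (c :: t) (by simp))
              (List.mem_cons_of_mem _ ((List.mem_singleton.mp hq) ▸ hm))
          have := ihp (c :: cur) acc hft f (by simp [pvJoin] at hfuel ⊢; omega)
          rw [pvJoin] at this
          rw [this]
          simp
    | cons q qs ihps =>
      intro p
      induction p with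
      | nil =>
        intro cur acc hf fuel hfuel
        cases fuel with
        | zero => simp [pvJoin] at hfuel
        | succ f =>
          have hcp : List.isPrefixOf [','] (',' :: pvJoin (q :: qs)) = true := by
            simp [List.isPrefixOf]
          rw [pvJoin, List.nil_append, PySem.Chars.splitOn.go, if_pos hcp]
          have := ihps q [] (cur.reverse :: acc)
            (fun r hr => hf r (List.mem_cons_of_mem _ hr))
            f (by simp [pvJoin] at hfuel ⊢; omega)
          simp only [List.length_cons, List.length_nil, List.drop_succ_cons, List.drop_zero]
          rw [this]
          simp
      | cons c t ihp =>
        intro cur acc hf fuel hfuel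
        cases fuel with
        | zero => simp [pvJoin] at hfuel
        | succ f =>
          have hc : c ≠ ',' := fun h => (hf (c :: t) (by simp)) (by simp [h])
          rw [pvJoin, List.cons_append, PySem.Chars.splitOn.go,
            if_neg (not_prefix_comma c _ hc)]
          have hft : ∀ r ∈ t :: q :: qs, ',' ∉ r := by
            intro r hr hm
            rcases List.mem_cons.mp hr with h | h
            · exact (hf (c :: t) (by simp)) (List.mem_cons_of_mem _ (h ▸ hm))
            · exact hf r (List.mem_cons_of_mem _ h) hm
          have := ihp (c :: cur) acc hft f (by simp [pvJoin] at hfuel ⊢; omega)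
          rw [pvJoin] at this
          rw [this]
          simp
  obtain ⟨p, ps', rfl⟩ := List.exists_cons_of_ne_nil hne
  unfold PySem.Chars.splitOn
  rw [go ps' p [] [] hfree _ (Nat.lt_succ_self _)]
  simp

lemma sub_fix_comma (a b : Char) (ha : a ≠ ',') : pvSub a b ',' = ',' := by
  simp [pvSub, Ne.symm ha]

lemma lowerChar_comma : PySem.Chars.lowerChar ',' = ',' := by decide

-- an uppercase letter never lowers to ','
lemma lowerChar_comma_iff (c : Char) (h : PySem.Chars.lowerChar c = ',') : c = ',' := by
  unfold PySem.Chars.lowerChar at h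
  split_ifs at h with hu
  · exfalso
    simp only [PySem.Chars.isupper, Bool.and_eq_true, decide_eq_true_eq] at hu
    have h1 : 65 ≤ c.toNat := Nat.succ_le_of_lt hu.1
    have h2 : c.toNat ≤ 90 := Nat.le_of_lt_succ (Nat.lt_succ_of_le hu.2)
    have hv := congrArg Char.toNat h
    rw [Char.toNat_ofNat, if_pos (by constructor; omega)] at hv
    have hcomma : (',' : Char).toNat = 44 := rfl
    omega
  · exact h

-- pieces stay comma-free after underscore substitution and lowering
lemma free_after (p : List Char) (h : ',' ∉ p) :
    ',' ∉ (p.map (pvSub '_' ' ')).map PySem.Chars.lowerChar := by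
  intro hm
  simp only [List.mem_map] at hm
  obtain ⟨d, ⟨c, hc, rfl⟩, hd⟩ := hm
  have hd' := lowerChar_comma_iff _ hd
  by_cases hcu : c = '_'
  · rw [hcu] at hd'
    exact absurd hd' (by decide)
  · rw [pvSub, if_neg hcu] at hd'
    exact h (hd' ▸ hc)

-- the whole pipeline, on character lists
lemma char_eq (cs : List Char) :
    (PySem.Chars.splitOn
        (PySem.Chars.lower
          (PySem.Chars.replace
            (PySem.Chars.replace (PySem.Chars.replace cs ['_','o','r','_'] [','] ) ['/'] [','] )
            ['_'] [' '])) [',']).map PySem.Chars.strip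
    = (pvRSplit cs).map
        (fun p => PySem.Chars.strip (PySem.Chars.lower (PySem.Chars.replace p ['_'] [' ']))) := by
  rw [replace_or, replace_single, replace_single, repOr_join]
  unfold PySem.Chars.lower
  rw [map_join _ (sub_fix_comma '_' ' ' (by decide)), map_join _ lowerChar_comma]
  rw [splitOn_join]
  · rw [List.map_map, List.map_map]
    apply List.map_congr_left
    intro p hp
    simp [replace_single, Function.comp]
  · simp [pvRSplit_ne_nil]
  · intro p hp
    simp only [List.map_map, List.mem_map] at hp
    obtain ⟨q, hq, rfl⟩ := hp
    have := free_after q ((comma_slash_free cs q hq).1)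
    simpa [List.map_map] using this

-- ===== VERDICT (by name: the statement is the Claim_ definition above) =====
theorem split_label_spec : Claim_equal_split_label := by
  intro x _
  unfold Spec_split_label split_label split_label_alt
  simp only [PySem.Str.replace, PySem.Str.lower, String.toList_ofList]
  have h4 : ("_or_" : String).toList = ['_','o','r','_'] := by decide
  have h1 : ("/" : String).toList = ['/'] := by decide
  have h2 : ("," : String).toList = [','] := by decide
  have h3 : ("_" : String).toList = ['_'] := by decide
  have hs : (" " : String).toList = [' '] := by decide
  rw [h4, h1, h2, h3, hs]
  have hmain := congrArg (List.map String.ofList) (char_eq x.toList)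
  simpa [List.map_map, Function.comp] using hmain
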